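-- pv_equiv track=rewrite | github.com/julie861106/PBC | PBC_HW8_4.py | get_score_by_rule_ab
-- ===== SOURCE A (Python) =====
-- def get_score_by_rule_ab(same_rank_record, a_count):
--     score = 0  # 累計
--     for same_rank_count in same_rank_record:
--
--         # same_rank_count 等於三但不是葫蘆
--         if same_rank_count == 3:
--             # 如果是 A 就可以計 3 分
--             if a_count == 3:
--                 score += 3
--             # 否則只能算一對的分數
--             else:
--                 score += 2
--
--         # same_rank_count 等於二，不論用兩張 A 或一對都是 2 分
--         else:
--             score += 2
--
--     # 在點數相同累計分數的時候已經算過出現 2 和 3 張 A 的分數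
--     # 只剩一張 A 還沒算
--     if a_count == 1:
--         score += 1
--
--     return score
-- ===== SOURCE B (Python) =====
-- def get_score_by_rule_ab(same_rank_record, a_count):
--     records = list(same_rank_record)
--     score = 2 * len(records)
--     if a_count == 3:
--         score += sum(1 for r in records if r == 3)
--     if a_count == 1:
--         score += 1
--     return score
-- ===== Notes on version B (the rewrite author's own statement) =====
-- stated objective: simpler
-- what changed: Replaces the per-element loop with a conditional by a closed-form expression: a baseline of 2 per record plus a count of records equal to 3 (only when a_count == 3) plus 1 when a_count == 1.
import Mathlib
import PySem

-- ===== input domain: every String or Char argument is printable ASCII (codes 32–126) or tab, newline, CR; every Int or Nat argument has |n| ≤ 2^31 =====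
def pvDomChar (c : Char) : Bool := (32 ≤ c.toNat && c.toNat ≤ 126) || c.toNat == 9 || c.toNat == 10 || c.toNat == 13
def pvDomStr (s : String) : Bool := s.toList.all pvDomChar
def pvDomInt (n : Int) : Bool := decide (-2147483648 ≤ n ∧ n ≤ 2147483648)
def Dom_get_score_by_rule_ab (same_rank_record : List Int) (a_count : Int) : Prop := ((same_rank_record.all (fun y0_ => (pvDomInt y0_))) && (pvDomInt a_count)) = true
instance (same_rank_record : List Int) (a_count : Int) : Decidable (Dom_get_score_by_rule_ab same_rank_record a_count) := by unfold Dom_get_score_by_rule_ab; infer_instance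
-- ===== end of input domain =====

-- ===== PORT A =====
-- literal port of A: fold over the list accumulating score, then the a_count == 1 bonus
def get_score_by_rule_ab (same_rank_record : List Int) (a_count : Int) : Int :=
  let score := same_rank_record.foldl (fun score same_rank_count =>
    if same_rank_count = 3 then
      if a_count = 3 then score + 3 else score + 2
    else score + 2) 0
  if a_count = 1 then score + 1 else score

-- ===== PORT B =====
-- port of B: closed form from length and a count of 3s
def get_score_by_rule_ab_alt (same_rank_record : List Int) (a_count : Int) : Int :=
  let records := same_rank_record
  let score := 2 * (records.length : Int)
  let score := if a_count = 3 then score + ((records.filter (fun r => r = 3)).length : Int) else score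
  if a_count = 1 then score + 1 else score

-- ===== PRECONDITION & SPEC =====
def Spec_get_score_by_rule_ab (same_rank_record : List Int) (a_count : Int) (out : Int) : Prop := out = get_score_by_rule_ab_alt same_rank_record a_count
instance (same_rank_record : List Int) (a_count : Int) (out : Int) : Decidable (Spec_get_score_by_rule_ab same_rank_record a_count out) := by unfold Spec_get_score_by_rule_ab; infer_instance

-- ===== CLAIM (what is proved, stated in full; the proofs are below) =====
def Claim_equal_get_score_by_rule_ab : Prop := ∀ (same_rank_record : List Int) (a_count : Int), Dom_get_score_by_rule_ab same_rank_record a_count → Spec_get_score_by_rule_ab same_rank_record a_count (get_score_by_rule_ab same_rank_record a_count)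

-- ===== LEMMAS AND PROOFS =====

-- ===== VERDICT (by name: the statement is the Claim_ definition above) =====
lemma fold_closed (l : List Int) (a_count : Int) (s : Int) :
    l.foldl (fun score same_rank_count =>
      if same_rank_count = 3 then
        if a_count = 3 then score + 3 else score + 2
      else score + 2) s
    = s + 2 * (l.length : Int)
        + (if a_count = 3 then ((l.filter (fun r => r = 3)).length : Int) else 0) := by
  induction l generalizing s with
  | nil => simp
  | cons x xs ih =>
    simp only [List.foldl_cons, List.filter_cons, ih]
    by_cases hx : x = 3 <;> by_cases ha : a_count = 3 <;>
      simp [hx, ha] <;> ring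

theorem get_score_by_rule_ab_spec : Claim_equal_get_score_by_rule_ab := by
  intro l a _
  unfold Spec_get_score_by_rule_ab get_score_by_rule_ab get_score_by_rule_ab_alt
  simp only [fold_closed]
  by_cases ha : a = 3 <;> simp [ha]
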